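-- pv_equiv track=rewrite | github.com/SherzodOtajonov/cp-stuff | codeforces/cf_round_690_div3/Favorite_Sequence.py | solve
-- ===== SOURCE A (Python) =====
-- def solve(n, b):
--     from math import ceil
--     res = []
--
--     idx = 0
--     while True:
--         if idx <= n - (idx +1):
--             res.append(b[idx])
--         if idx < n - (idx + 1):
--             res.append(b[n-(idx+1)])
--             idx += 1
--         else: return ' '.join(res)
-- ===== SOURCE B (Python) =====
-- def solve(n, b):
--     m = (n + 1) // 2
--     front = b[:m]
--     back = b[m:n][::-1]
--     out = []
--     for x, y in zip(front, back):
--         out.append(x)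
--         out.append(y)
--     if n % 2 == 1:
--         out.append(front[-1])
--     return ' '.join(out)
-- ===== Notes on version B (the rewrite author's own statement) =====
-- stated objective: simpler
-- what changed: A walks a single index inward, guarding front/middle/back appends with two inequality tests inside one while-loop; B pre-slices the front half and the reversed back half and zips them, appending the odd middle element once at the end.
-- outside the precondition, e.g. on solve(-1, ['a']): A returns '', B raises IndexError; on solve(4, ['a']): A raises IndexError, B returns ''
import Mathlib
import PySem

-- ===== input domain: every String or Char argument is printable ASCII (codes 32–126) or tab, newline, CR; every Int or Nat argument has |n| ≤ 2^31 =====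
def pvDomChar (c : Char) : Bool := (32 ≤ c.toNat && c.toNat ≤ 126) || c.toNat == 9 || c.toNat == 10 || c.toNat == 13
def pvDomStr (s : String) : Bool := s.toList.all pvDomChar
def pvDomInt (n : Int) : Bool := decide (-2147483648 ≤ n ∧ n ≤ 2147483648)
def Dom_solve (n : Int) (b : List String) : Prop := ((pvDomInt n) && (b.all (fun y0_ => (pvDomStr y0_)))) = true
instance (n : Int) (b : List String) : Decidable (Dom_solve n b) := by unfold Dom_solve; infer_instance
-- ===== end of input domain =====

-- B replaces A's inward-walking index loop by two pre-sliced halves (front, reversed back) zipped together (objective: simpler).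


-- ===== PORT A =====
-- A's while-loop, step for step: idx walks inward, appending b[idx] and b[n-(idx+1)]
-- (pyGet? … |>.getD "" : Pre_solve keeps every index in range, so the default is never taken there)
def solveLoopA (n : Int) (b : List String) (idx : Int) (res : List String) : List String :=
  let res1 := if idx ≤ n - (idx + 1) then res ++ [(PySem.List.pyGet? b idx).getD ""] else res
  if _h : idx < n - (idx + 1) then
    solveLoopA n b (idx + 1) (res1 ++ [(PySem.List.pyGet? b (n - (idx + 1))).getD ""])
  else res1
termination_by (n - 2 * idx).toNat
decreasing_by omega

def solve (n : Int) (b : List String) : String :=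
  PySem.Str.join " " (solveLoopA n b 0 [])

-- ===== PORT B =====
-- Source B: m = (n+1)//2; front = b[:m]; back = b[m:n][::-1]; interleave zip(front, back); if n odd append front[-1]
-- ([::-1] is List.reverse: PySem.List.slice?_none_none_neg_one)
def solve_alt (n : Int) (b : List String) : String :=
  let m := PySem.Int.floordiv (n + 1) 2
  let front := PySem.List.slice b none (some m)
  let back := (PySem.List.slice b (some m) (some n)).reverse
  let out := (front.zip back).foldl (fun acc p => acc ++ [p.1, p.2]) ([] : List String)
  let out := if PySem.Int.mod n 2 = 1 then out ++ [(PySem.List.pyGet? front (-1)).getD ""] else out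
  PySem.Str.join " " out

-- ===== PRECONDITION & SPEC =====
-- Pre_ excludes n > len(b), where A raises IndexError, and odd negative n, where B's own slicing
-- (front[-1] on an empty front) raises IndexError while A's '' is an accident of the loop guard;
-- even negative n stays inside (both return '').
def Pre_solve (n : Int) (b : List String) : Prop := (0 ≤ n ∧ n ≤ (b.length : Int)) ∨ (n < 0 ∧ n % 2 = 0)
instance (n : Int) (b : List String) : Decidable (Pre_solve n b) := by unfold Pre_solve; infer_instance
def pvWitness_solve : Int × List String := (3, ["a", "bb", "c"])

def Spec_solve (n : Int) (b : List String) (out : String) : Prop := out = solve_alt n b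
instance (n : Int) (b : List String) (out : String) : Decidable (Spec_solve n b out) := by unfold Spec_solve; infer_instance

-- ===== CLAIM (what is proved, stated in full; the proofs are below) =====
def Claim_equal_solve : Prop := ∀ (n : Int) (b : List String), Dom_solve n b → Pre_solve n b → Spec_solve n b (solve n b)

-- ===== LEMMAS AND PROOFS =====

-- the interleaving both programs produce, as a structural recursion on the two half-lists
def mixL : List String → List String → List String
  | [], _ => []
  | x :: _, [] => [x]
  | x :: xs, y :: ys => x :: y :: mixL xs ys

-- A's loop from idx = k produces the interleaving of what is left of the two halves
lemma loopA_eq (n : Int) (b : List String) (hn : 0 ≤ n) (hlen : n ≤ (b.length : Int)) :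
    ∀ (d k : Nat) (res : List String), (n.toNat + 1) / 2 - k = d → k ≤ (n.toNat + 1) / 2 →
      solveLoopA n b (k : Int) res =
        res ++ mixL ((b.take ((n.toNat + 1) / 2)).drop k)
          ((((b.drop ((n.toNat + 1) / 2)).take (n.toNat - (n.toNat + 1) / 2)).reverse).drop k) := by
  intro d
  set N := n.toNat with hN
  set M := (N + 1) / 2 with hM
  have hnN : n = (N : Int) := by omega
  have hNlen : N ≤ b.length := by omega
  set backRev := (((b.drop M).take (N - M)).reverse) with hback
  have hlenF : (b.take M).length = M := by simp; omega
  have hlenG : backRev.length = N - M := by simp [hback]; omega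
  induction d with
  | zero =>
    intro k res hd hk
    have hkM : k = M := by omega
    subst hkM
    rw [solveLoopA]
    have c1 : ¬ ((M : Int) ≤ n - ((M:Int) + 1)) := by omega
    have c2 : ¬ ((M : Int) < n - ((M:Int) + 1)) := by omega
    simp only [if_neg c1, dif_neg c2]
    have : (b.take M).drop M = [] := by
      apply List.drop_eq_nil_of_le; simp
    rw [this]; simp [mixL]
  | succ d ih =>
    intro k res hd hk
    have hkM : k < M := by omega
    rw [solveLoopA]
    have c1 : ((k : Int) ≤ n - ((k:Int) + 1)) := by omega
    have hkb : k < b.length := by omega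
    have hgetk : (PySem.List.pyGet? b (k : Int)).getD "" = b[k] := by
      rw [PySem.List.pyGet?_natCast]; simp [hkb]
    have hFdrop : (b.take M).drop k = b[k] :: (b.take M).drop (k + 1) := by
      rw [List.drop_eq_getElem_cons (by omega)]
      congr 1
      exact List.getElem_take
    by_cases c2 : ((k : Int) < n - ((k:Int) + 1))
    · -- back element also appended, recurse
      have hk2 : k < N - M := by omega
      have hidx : n - ((k : Int) + 1) = ((N - 1 - k : Nat) : Int) := by omega
      have hbk : N - 1 - k < b.length := by omega
      have hgetb : (PySem.List.pyGet? b (n - ((k:Int) + 1))).getD "" = b[N - 1 - k] := by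
        rw [hidx, PySem.List.pyGet?_natCast]; simp [hbk]
      have hGk : k < backRev.length := by omega
      have hGdrop : backRev.drop k = b[N - 1 - k] :: backRev.drop (k + 1) := by
        rw [List.drop_eq_getElem_cons hGk]
        congr 1
        simp only [hback, List.getElem_reverse, List.length_take, List.length_drop,
          List.getElem_take, List.getElem_drop]
        congr 1
        omega
      simp only [if_pos c1, dif_pos c2]
      have hc : ((k : Int) + 1) = (((k+1 : Nat)) : Int) := by push_cast; ring
      rw [hc]
      rw [ih (k+1) _ (by omega) (by omega)]
      rw [hFdrop, hGdrop, hgetk]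
      rw [show (PySem.List.pyGet? b (n - ((k+1 : Nat) : Int))).getD "" = b[N - 1 - k] from by rw [← hc]; exact hgetb]
      simp [mixL]
    · -- middle element: k = M - 1, N odd
      have hodd : 2 * k + 1 = N := by omega
      simp only [if_pos c1, dif_neg c2]
      have hF1 : (b.take M).drop (k+1) = [] := by
        apply List.drop_eq_nil_of_le; simp; omega
      have hG0 : backRev.drop k = [] := by
        apply List.drop_eq_nil_of_le; omega
      rw [hFdrop, hF1, hG0, hgetk]
      simp [mixL]

-- the zip-interleave plus the optional middle element equals mixL
lemma mix_eq_zip (F G : List String) (h1 : G.length ≤ F.length) (h2 : F.length ≤ G.length + 1) :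
    mixL F G = (F.zip G).flatMap (fun p => [p.1, p.2]) ++
      (if F.length = G.length + 1 then [F.getLast?.getD ""] else []) := by
  induction F generalizing G with
  | nil =>
    have : G = [] := by cases G <;> simp_all
    subst this; simp [mixL]
  | cons x xs ih =>
    cases G with
    | nil =>
      have : xs = [] := by cases xs <;> simp_all
      subst this; simp [mixL]
    | cons y ys =>
      simp only [mixL, List.zip_cons_cons, List.flatMap_cons]
      rw [ih ys (by simpa using h1) (by simpa using h2)]
      rcases xs with _ | ⟨z, zs⟩
      · simp_all [mixL]
      · simp [List.getLast?_cons_cons]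

theorem final (n : Int) (b : List String) (hn : 0 ≤ n) (hlen : n ≤ (b.length : Int)) :
    solve n b = solve_alt n b := by
  set N := n.toNat with hN
  set M := (N + 1) / 2 with hM
  have hnN : n = (N : Int) := by omega
  have hNlen : N ≤ b.length := by omega
  unfold solve solve_alt
  dsimp only
  have hm : PySem.Int.floordiv (n + 1) 2 = (M : Int) := by
    rw [show n + 1 = ((N + 1 : Nat) : Int) by omega]
    exact_mod_cast PySem.Int.floordiv_natCast (N + 1) 2
  rw [hm]
  rw [PySem.List.slice_to_natCast]
  rw [show (some n) = (some ((N : Nat) : Int)) by rw [hnN], PySem.List.slice_natCast]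
  have hmod : PySem.Int.mod n 2 = ((N % 2 : Nat) : Int) := by
    rw [hnN]; exact_mod_cast PySem.Int.mod_natCast N 2
  rw [hmod]
  have h0 := loopA_eq n b hn hlen M 0 [] (by omega) (by omega)
  norm_num at h0
  rw [h0]
  have hlenF : (b.take M).length = M := by simp; omega
  have hlenG : ((b.drop M).take (N - M)).reverse.length = N - M := by simp; omega
  rw [mix_eq_zip _ _ (by rw [hlenF, hlenG]; omega) (by rw [hlenF, hlenG]; omega)]
  rw [PySem.List.foldl_append_eq_flatMap, PySem.List.pyGet?_neg_one]
  simp only [List.nil_append]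
  rw [hlenF, hlenG]
  have hiff : ((N % 2 : Nat) : Int) = 1 ↔ M = N - M + 1 := by omega
  simp only [hiff]
  split_ifs
  · rfl
  · rw [List.append_nil]

-- the even-negative-n corner: both programs return the empty string
theorem final_neg (n : Int) (b : List String) (hn : n < 0) (he : n % 2 = 0) :
    solve n b = solve_alt n b := by
  have hn2 : n ≤ -2 := by omega
  unfold solve solve_alt
  dsimp only
  rw [solveLoopA]
  have c1 : ¬ ((0 : Int) ≤ n - (0 + 1)) := by omega
  have c2 : ¬ ((0 : Int) < n - (0 + 1)) := by omega
  simp only [if_neg c1, dif_neg c2]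
  set m := PySem.Int.floordiv (n + 1) 2 with hm
  have hmlt : m < 0 := by
    rw [hm, PySem.Int.floordiv_lt_iff_lt_mul (by omega)]; omega
  have hnm : n ≤ m := by
    rw [hm, PySem.Int.le_floordiv_iff_mul_le (by omega)]; omega
  have hback : PySem.List.slice b (some m) (some n) = [] := by
    apply List.eq_nil_of_length_eq_zero
    rw [PySem.List.length_slice]
    have h1 := PySem.List.clampIdx_neg_natCast (n := b.length) (k := (-n).toNat) (by omega)
    have h2 := PySem.List.clampIdx_neg_natCast (n := b.length) (k := (-m).toNat) (by omega)
    rw [show n = -((-n).toNat : Int) by omega, show m = -((-m).toNat : Int) by omega, h1, h2]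
    omega
  rw [hback]
  have hmod' : ¬ (n % 2 = 1) := by omega
  simp [hmod']

-- ===== VERDICT (by name: the statement is the Claim_ definition above) =====
theorem solve_spec : Claim_equal_solve := by
  intro n b _hdom hpre
  unfold Spec_solve
  rcases hpre with ⟨h1, h2⟩ | ⟨h1, h2⟩
  · exact final n b h1 h2
  · exact final_neg n b h1 h2
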